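-- pv_equiv track=rewrite | github.com/fatfingererr/macro-skills | skills/wasde-ingestor/scripts/parse_tables.py | _is_data_row
-- ===== SOURCE A (Python) =====
-- from typing import Dict, List, Optional, Any
--
-- def _parse_cell_value(cell: str) -> Any:
--     """Parse cell value to appropriate type."""
--     if not cell or cell.strip() in ['', '-', '--', 'N/A', 'n.a.', '*']:
--         return None
--
--     cell = str(cell).strip()
--
--     # Handle negative numbers in parentheses: (100) -> -100
--     if cell.startswith('(') and cell.endswith(')'):
--         cell = '-' + cell[1:-1]
--
--     # Remove thousand separators
--     cell = cell.replace(',', '')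
--
--     # Try to parse as number
--     try:
--         if '.' in cell:
--             return float(cell)
--         else:
--             return int(cell)
--     except ValueError:
--         return cell
--
-- def _is_data_row(row: List) -> bool:
--     """Check if row contains data (not headers/notes)."""
--     if not row:
--         return False
--
--     # Count non-empty cells
--     non_empty = sum(1 for cell in row if cell and str(cell).strip())
--
--     # Count numeric cells
--     numeric = 0
--     for cell in row:
--         if cell:
--             try:
--                 _parse_cell_value(str(cell))
--                 numeric += 1
--             except:
--                 pass
--
--     # Data row should have multiple numeric values
--     return non_empty >= 2 and numeric >= 1
-- ===== SOURCE B (Python) =====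
-- from typing import List
--
-- def _is_data_row(row: List) -> bool:
--     """Check if row contains data (not headers/notes)."""
--     # One pass: _parse_cell_value never raises, so A's `numeric` just counts
--     # truthy cells, and two non-empty-stripped cells already guarantee one.
--     return sum(1 for cell in row if cell and str(cell).strip()) >= 2
-- ===== Notes on version B (the rewrite author's own statement) =====
-- stated objective: simpler
-- what changed: B collapses A's guard plus two counting loops into a single count of non-empty-stripped cells, since _parse_cell_value never raises and non_empty >= 2 already forces numeric >= 1.
import Mathlib
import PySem

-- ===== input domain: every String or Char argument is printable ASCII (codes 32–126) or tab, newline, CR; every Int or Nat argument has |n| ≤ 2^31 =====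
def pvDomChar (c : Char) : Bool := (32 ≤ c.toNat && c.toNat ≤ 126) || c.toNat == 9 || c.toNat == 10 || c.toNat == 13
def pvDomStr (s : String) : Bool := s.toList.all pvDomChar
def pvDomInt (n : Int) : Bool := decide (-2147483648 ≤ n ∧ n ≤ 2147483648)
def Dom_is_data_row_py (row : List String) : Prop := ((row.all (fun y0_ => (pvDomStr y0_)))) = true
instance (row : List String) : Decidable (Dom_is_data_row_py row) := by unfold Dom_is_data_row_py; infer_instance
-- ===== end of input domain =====

-- B replaces A's guard and two counting loops by a single count of non-empty-stripped
-- cells (simpler): _parse_cell_value never raises and the value is discarded, so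
-- non_empty >= 2 already implies numeric >= 1.

-- ===== PORT A =====
-- Return type of _parse_cell_value. Its value is DISCARDED by _is_data_row; `floatv`
-- stands for the `'.' in cell` branch (float(cell) or, on ValueError, the string —
-- not representable exactly, but irrelevant: only normal termination matters here,
-- and that branch always returns normally).
inductive PVal where
  | nonev : PVal
  | intv : Int → PVal
  | floatv : String → PVal
  | strv : String → PVal
deriving DecidableEq, Repr

def parse_cell_value_py (cell : String) : PVal :=
  if cell = "" ∨ PySem.Str.strip cell ∈ ["", "-", "--", "N/A", "n.a.", "*"] then .nonev
  else
    let cell := PySem.Str.strip cell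
    let cell :=
      if PySem.Str.startswith cell "(" && PySem.Str.endswith cell ")" then
        "-" ++ PySem.Str.slice cell (some 1) (some (-1))
      else cell
    let cell := PySem.Str.replace cell "," ""
    if PySem.Str.isIn "." cell then .floatv cell
    else
      match PySem.Int.ofStr? cell with
      | some n => .intv n
      | none => .strv cell

def is_data_row_py (row : List String) : Bool :=
  if row = [] then false
  else
    -- non_empty = sum(1 for cell in row if cell and str(cell).strip())
    let non_empty : Int :=
      row.foldl (fun acc cell =>
        if cell ≠ "" ∧ PySem.Str.strip cell ≠ "" then acc + 1 else acc) 0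
    -- numeric loop: _parse_cell_value never raises, so the except branch is dead
    let numeric : Int :=
      row.foldl (fun numeric cell =>
        if cell ≠ "" then
          let _ := parse_cell_value_py cell
          numeric + 1
        else numeric) 0
    decide (non_empty ≥ 2 ∧ numeric ≥ 1)

-- ===== PORT B =====
-- Source B: return sum(1 for cell in row if cell and str(cell).strip()) >= 2
def is_data_row_py_alt (row : List String) : Bool :=
  decide ((row.countP (fun cell => cell ≠ "" ∧ PySem.Str.strip cell ≠ "") : Int) ≥ 2)

-- ===== PRECONDITION & SPEC =====
def Spec_is_data_row_py (row : List String) (out : Bool) : Prop := out = is_data_row_py_alt row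
instance (row : List String) (out : Bool) : Decidable (Spec_is_data_row_py row out) := by unfold Spec_is_data_row_py; infer_instance

-- ===== CLAIM (what is proved, stated in full; the proofs are below) =====
def Claim_equal_is_data_row_py : Prop := ∀ (row : List String), Dom_is_data_row_py row → Spec_is_data_row_py row (is_data_row_py row)

-- ===== LEMMAS AND PROOFS =====

-- every cell counted by non_empty is counted by the numeric loop
lemma countP_nonempty_le (row : List String) :
    row.countP (fun cell => cell ≠ "" ∧ PySem.Str.strip cell ≠ "")
      ≤ row.countP (fun cell => cell ≠ "") := by
  apply List.countP_mono_left
  intro x _ h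
  simp only [decide_eq_true_eq] at h ⊢
  exact h.1

-- ===== VERDICT (by name: the statement is the Claim_ definition above) =====
theorem is_data_row_py_spec : Claim_equal_is_data_row_py := by
  intro row _
  unfold Spec_is_data_row_py is_data_row_py is_data_row_py_alt
  have h1 := PySem.List.foldl_ite_add_one
    (l := row) (p := fun cell => cell ≠ "" ∧ PySem.Str.strip cell ≠ "") (a := (0 : Int))
  have h2 := PySem.List.foldl_ite_add_one
    (l := row) (p := fun cell => cell ≠ "") (a := (0 : Int))
  simp only [zero_add] at h1 h2
  cases row with
  | nil => rfl
  | cons x xs =>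
    simp only [if_neg (List.cons_ne_nil x xs), h1, h2]
    rw [decide_eq_decide]
    have hle := countP_nonempty_le (x :: xs)
    omega
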